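-- pv_equiv track=rewrite | github.com/MrBrantCode/unitest_baseline | mut_generate/mist_train_taco/taco_6481/solution.py | min_changes_for_distinct_substrings
-- ===== SOURCE A (Python) =====
-- def min_changes_for_distinct_substrings(s: str) -> int:
--     arr = []
--     arr1 = []
--     for char in s:
--         if char not in arr:
--             arr.append(char)
--         else:
--             arr1.append(char)
--     return len(arr1)
-- ===== SOURCE B (Python) =====
-- def min_changes_for_distinct_substrings(s: str) -> int:
--     counts = {}
--     for ch in s:
--         counts[ch] = counts.get(ch, 0) + 1
--     return sum(c - 1 for c in counts.values())
-- ===== Notes on version B (the rewrite author's own statement) =====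
-- stated objective: idiomatic
-- what changed: B replaces A's per-character membership scan over a growing list of already-encountered characters (plus a second list of duplicates) by building a frequency table in one pass and then summing count minus one over the distinct characters.
import Mathlib
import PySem

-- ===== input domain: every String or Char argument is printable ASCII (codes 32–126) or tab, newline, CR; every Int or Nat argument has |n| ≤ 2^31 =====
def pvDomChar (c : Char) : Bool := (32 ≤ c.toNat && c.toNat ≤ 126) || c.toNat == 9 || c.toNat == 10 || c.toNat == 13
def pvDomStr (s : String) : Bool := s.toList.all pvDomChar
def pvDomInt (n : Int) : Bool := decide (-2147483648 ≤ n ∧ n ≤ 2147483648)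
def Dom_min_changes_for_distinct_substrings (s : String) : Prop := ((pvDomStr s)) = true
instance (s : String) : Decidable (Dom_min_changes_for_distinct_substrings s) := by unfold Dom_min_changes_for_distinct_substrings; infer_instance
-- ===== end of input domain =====

-- B replaces A's per-character list-membership scan by a frequency table plus a reduce over its values (objective: idiomatic).

-- ===== PORT A =====
-- literal port: arr = seen characters (append on first sight), arr1 = duplicates; returns len(arr1)
def min_changes_for_distinct_substrings (s : String) : Int :=
  let st := s.toList.foldl
    (fun (st : List Char × List Char) char =>
      if ¬ st.1.contains char then (st.1 ++ [char], st.2)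
      else (st.1, st.2 ++ [char]))
    ([], [])
  (st.2.length : Int)

-- ===== PORT B =====
-- literal port of Source B: counts[ch] = counts.get(ch, 0) + 1, then sum(c - 1 for c in counts.values())
def min_changes_for_distinct_substrings_alt (s : String) : Int :=
  let counts := s.toList.foldl
    (fun (d : PySem.Dict Char Int) ch => d.insert ch (d.getD ch 0 + 1))
    PySem.Dict.empty
  (counts.values.map (fun c => c - 1)).sum

-- ===== PRECONDITION & SPEC =====
def Spec_min_changes_for_distinct_substrings (s : String) (out : Int) : Prop := out = min_changes_for_distinct_substrings_alt s
instance (s : String) (out : Int) : Decidable (Spec_min_changes_for_distinct_substrings s out) := by unfold Spec_min_changes_for_distinct_substrings; infer_instance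

-- ===== CLAIM (what is proved, stated in full; the proofs are below) =====
def Claim_equal_min_changes_for_distinct_substrings : Prop := ∀ (s : String), Dom_min_changes_for_distinct_substrings s → Spec_min_changes_for_distinct_substrings s (min_changes_for_distinct_substrings s)

-- ===== LEMMAS AND PROOFS =====

-- A's loop invariant: duplicates found + distinct seen = chars processed (+ initial state)
lemma pvA_invariant (cs : List Char) : ∀ (arr arr1 : List Char),
    ((cs.foldl
      (fun (st : List Char × List Char) char =>
        if ¬ st.1.contains char then (st.1 ++ [char], st.2)
        else (st.1, st.2 ++ [char]))
      (arr, arr1)).2).length + (PySem.Set.update arr cs).length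
      = arr1.length + cs.length + arr.length := by
  induction cs with
  | nil => intro arr arr1; simp [PySem.Set.update]
  | cons c cs ih =>
    intro arr arr1
    simp only [List.foldl_cons, PySem.Set.update] at ih ⊢
    by_cases h : arr.contains c
    · have hm : c ∈ arr := by simpa using h
      have hadd : PySem.Set.add arr c = arr := by simp [PySem.Set.add, hm]
      rw [if_neg (not_not_intro h), hadd]
      have := ih arr (arr1 ++ [c])
      simp only [List.length_append, List.length_cons, List.length_nil] at this ⊢
      omega
    · have hm : c ∉ arr := by simpa using h
      have hadd : PySem.Set.add arr c = arr ++ [c] := by simp [PySem.Set.add, hm]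
      rw [if_pos h, hadd]
      have := ih (arr ++ [c]) arr1
      simp only [List.length_append, List.length_cons, List.length_nil] at this ⊢
      omega

-- ∑ over a list of (f k - 1) = ∑ f - length
lemma pv_sum_map_sub_one (l : List Char) (f : Char → Int) :
    (l.map (fun k => f k - 1)).sum = (l.map f).sum - l.length := by
  induction l with
  | nil => simp
  | cons x t ih => simp [ih]; ring

-- summing the multiplicities of the distinct characters gives the length
lemma pv_sum_counts (cs : List Char) :
    ((PySem.Set.ofList cs).map (fun k => (cs.count k : Int))).sum = (cs.length : Int) := by
  have h1 : ((PySem.Set.ofList cs).map (fun k => cs.count k)).sum = cs.length := by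
    rw [← List.sum_toFinset (fun a => cs.count a) (PySem.Set.nodup_ofList cs)]
    have : (PySem.Set.ofList cs).toFinset = cs.toFinset := by
      ext a; simp [List.mem_toFinset, PySem.Set.mem_ofList]
    rw [this]
    exact List.sum_toFinset_count_eq_length cs
  calc ((PySem.Set.ofList cs).map (fun k => (cs.count k : Int))).sum
      = (((PySem.Set.ofList cs).map (fun k => cs.count k)).sum : Int) := by
        rw [Nat.cast_list_sum, List.map_map]; rfl
    _ = (cs.length : Int) := by rw [h1]

-- B computes length − number of distinct characters
lemma pvB_closed (s : String) :
    min_changes_for_distinct_substrings_alt s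
      = (s.toList.length : Int) - ((PySem.Set.ofList s.toList).length : Int) := by
  show ((PySem.Dict.counter s.toList).values.map (fun c => c - 1)).sum
      = (s.toList.length : Int) - ((PySem.Set.ofList s.toList).length : Int)
  have hv : (PySem.Dict.counter s.toList).values
      = (PySem.Set.ofList s.toList).map (fun k => (s.toList.count k : Int)) := by
    show ((PySem.Dict.counter s.toList).items.map Prod.snd) = _
    rw [PySem.Dict.items_counter, List.map_map]
    rfl
  rw [hv, List.map_map]
  simp only [Function.comp_def]
  rw [pv_sum_map_sub_one (PySem.Set.ofList s.toList) (fun k => (s.toList.count k : Int)),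
    pv_sum_counts]

-- ===== VERDICT (by name: the statement is the Claim_ definition above) =====
theorem min_changes_for_distinct_substrings_spec : Claim_equal_min_changes_for_distinct_substrings := by
  intro s _
  show min_changes_for_distinct_substrings s = min_changes_for_distinct_substrings_alt s
  rw [pvB_closed]
  show (((s.toList.foldl
      (fun (st : List Char × List Char) char =>
        if ¬ st.1.contains char then (st.1 ++ [char], st.2)
        else (st.1, st.2 ++ [char]))
      ([], [])).2).length : Int)
    = (s.toList.length : Int) - ((PySem.Set.ofList s.toList).length : Int)
  have h := pvA_invariant s.toList [] []
  have hof : PySem.Set.update ([] : List Char) s.toList = PySem.Set.ofList s.toList := rfl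
  rw [hof] at h
  simp only [List.length_nil] at h
  omega
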